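-- pv_equiv track=rewrite | github.com/importsys-py/Collatz-Deep-Dive | src/congettura.py | _collatz_superfast_pure
-- ===== SOURCE A (Python) =====
-- class AnomalyDetectedError(Exception):
--     def __init__(self, n: int, final: int, steps: int, peak: int, expected_final: int = 1):
--         self.n = n
--         self.final = final
--         self.steps = steps
--         self.peak = peak
--         self.expected_final = expected_final
--         super().__init__(f"Anomaly: n={n} ended at {final} (expected {expected_final})")
--
-- def _collatz_superfast_pure(n: int) -> tuple[int, int, int, int, int]:
--     steps = even = odd = 0
--     peak = n
--     while n > 1:
--         if n & 1 == 0: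
--             tz = (n & -n).bit_length() - 1
--             n >>= tz
--             even += tz
--             steps += tz
--         else:
--             n = n + (n << 1) + 1
--             odd += 1
--             steps += 1
--         if n > peak:
--             peak = n
--     if n != 1:
--         raise AnomalyDetectedError(steps, n, steps, peak, 1)
--     return steps, even, odd, n, peak
-- ===== SOURCE B (Python) =====
-- class AnomalyDetectedError(Exception):
--     def __init__(self, n: int, final: int, steps: int, peak: int, expected_final: int = 1):
--         self.n = n
--         self.final = final
--         self.steps = steps
--         self.peak = peak
--         self.expected_final = expected_final
--         super().__init__(f"Anomaly: n={n} ended at {final} (expected {expected_final})")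
--
-- def _collatz_superfast_pure(n: int) -> tuple[int, int, int, int, int]:
--     steps = even = odd = 0
--     peak = n
--     while n > 1:
--         if n % 2:
--             n = 3 * n + 1
--             odd += 1
--         else:
--             n //= 2
--             even += 1
--         steps += 1
--         if n > peak:
--             peak = n
--     if n != 1:
--         raise AnomalyDetectedError(steps, n, steps, peak, 1)
--     return steps, even, odd, n, peak
-- ===== Notes on version B (the rewrite author's own statement) =====
-- stated objective: simpler
-- what changed: Replaced the bit-trick batch stripping of all trailing zero bits per iteration ((n & -n).bit_length()-1 and a shift) with the plain textbook one-halving-per-step Collatz loop; equivalence needs the invariant that even steps never raise the peak.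
import Mathlib
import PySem

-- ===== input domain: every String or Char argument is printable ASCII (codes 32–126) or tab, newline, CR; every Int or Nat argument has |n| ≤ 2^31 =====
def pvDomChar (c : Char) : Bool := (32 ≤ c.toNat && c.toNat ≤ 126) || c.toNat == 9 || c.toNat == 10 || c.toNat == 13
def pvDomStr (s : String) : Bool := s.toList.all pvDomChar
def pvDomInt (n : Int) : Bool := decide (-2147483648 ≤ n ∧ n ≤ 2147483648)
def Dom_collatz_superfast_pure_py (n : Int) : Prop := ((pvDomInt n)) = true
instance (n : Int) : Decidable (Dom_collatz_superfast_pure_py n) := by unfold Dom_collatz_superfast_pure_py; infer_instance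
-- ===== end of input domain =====

-- B replaces A's bit-trick batch stripping of trailing zeros with the plain one-halving-per-step
-- Collatz loop (objective: simpler). Equivalence proved for the RETURN value on n ≥ 1 (A raises otherwise).

-- ===== PORT A =====

-- port of `(n & -n).bit_length() - 1` for n > 0: the number of trailing zero bits
def tzNat (n : Nat) : Nat :=
  if _h : n = 0 then 0
  else if n % 2 = 0 then tzNat (n / 2) + 1 else 0
decreasing_by exact Nat.div_lt_self (Nat.pos_of_ne_zero _h) (by omega)

-- A's `while n > 1` loop. `fuel` bounds the total `steps` counter (each iteration consumes
-- exactly the amount it adds to `steps`); on fuel exhaustion — never reached on the tested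
-- domain — a fixed sentinel is returned. The two guards only make the recursion total.
def srcLoop (fuel : Nat) (n steps even odd peak : Int) : Int × Int × Int × Int × Int :=
  if 1 < n then
    match fuel with
    | 0 => (-1, -1, -1, -1, -1)
    | f + 1 =>
      if PySem.Int.mod n 2 = 0 then        -- `n & 1 == 0` (n & 1 = n % 2 in Python)
        let tz : Nat := tzNat n.toNat
        if _h : tz ≤ f + 1 ∧ 1 ≤ tz then
          let n' := PySem.Int.floordiv n (2 ^ tz)   -- `n >>= tz`
          let peak' := if peak < n' then n' else peak
          srcLoop (f + 1 - tz) n' (steps + (tz : Int)) (even + (tz : Int)) odd peak'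
        else (-1, -1, -1, -1, -1)
      else
        let n' := n + 2 * n + 1            -- `n + (n << 1) + 1`
        let peak' := if peak < n' then n' else peak
        srcLoop f n' (steps + 1) even (odd + 1) peak'
  else (steps, even, odd, n, peak)
termination_by fuel
decreasing_by · omega
              · omega

-- after the loop A raises if n ≠ 1 (excluded by Pre_); else returns (steps, even, odd, n, peak)
def collatz_superfast_pure_py (n : Int) : Int × Int × Int × Int × Int :=
  srcLoop 100000 n 0 0 0 n

-- ===== PORT B =====

-- Source B's loop: one halving or one 3n+1 step per iteration, `steps` once per iteration,
-- peak check after the step; same fuel convention as above (one unit per step).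
def altLoop (fuel : Nat) (n steps even odd peak : Int) : Int × Int × Int × Int × Int :=
  if 1 < n then
    match fuel with
    | 0 => (-1, -1, -1, -1, -1)
    | f + 1 =>
      if PySem.Int.mod n 2 ≠ 0 then        -- `if n % 2:`
        let n' := 3 * n + 1
        let peak' := if peak < n' then n' else peak
        altLoop f n' (steps + 1) even (odd + 1) peak'
      else
        let n' := PySem.Int.floordiv n 2   -- `n //= 2`
        let peak' := if peak < n' then n' else peak
        altLoop f n' (steps + 1) (even + 1) odd peak'
  else (steps, even, odd, n, peak)
termination_by fuel

def collatz_superfast_pure_py_alt (n : Int) : Int × Int × Int × Int × Int :=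
  altLoop 100000 n 0 0 0 n

-- ===== PRECONDITION & SPEC =====
-- Pre_ excludes exactly n ≤ 0, where A raises AnomalyDetectedError (B raises there too).
def Pre_collatz_superfast_pure_py (n : Int) : Prop := 1 ≤ n
instance (n : Int) : Decidable (Pre_collatz_superfast_pure_py n) := by unfold Pre_collatz_superfast_pure_py; infer_instance
def pvWitness_collatz_superfast_pure_py : Int := 6

def Spec_collatz_superfast_pure_py (n : Int) (out : Int × Int × Int × Int × Int) : Prop := out = collatz_superfast_pure_py_alt n
instance (n : Int) (out : Int × Int × Int × Int × Int) : Decidable (Spec_collatz_superfast_pure_py n out) := by unfold Spec_collatz_superfast_pure_py; infer_instance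

-- ===== CLAIM (what is proved, stated in full; the proofs are below) =====
def Claim_equal_collatz_superfast_pure_py : Prop := ∀ (n : Int), Dom_collatz_superfast_pure_py n → Pre_collatz_superfast_pure_py n → Spec_collatz_superfast_pure_py n (collatz_superfast_pure_py n)


-- ===== LEMMAS AND PROOFS =====

lemma tzNat_pow (k m : Nat) (h : m % 2 = 1) : tzNat (2 ^ k * m) = k := by
  induction k with
  | zero => rw [tzNat]; simp [h]
  | succ k ih =>
      rw [tzNat]
      have hm : m ≠ 0 := by omega
      have hne : 2 ^ (k + 1) * m ≠ 0 := by positivity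
      have hev : (2 ^ (k + 1) * m) % 2 = 0 := by
        have : 2 ^ (k + 1) * m = 2 * (2 ^ k * m) := by ring
        omega
      have hdiv : 2 ^ (k + 1) * m / 2 = 2 ^ k * m := by
        have : 2 ^ (k + 1) * m = 2 ^ k * m * 2 := by ring
        rw [this, Nat.mul_div_cancel]; omega
      simp [hne, hev, hdiv, ih]



lemma altLoop_base (fuel : Nat) (n s e o p : Int) (h : ¬ 1 < n) :
    altLoop fuel n s e o p = (s, e, o, n, p) := by rw [altLoop.eq_def]; simp [h]

lemma altLoop_zero (n s e o p : Int) (h : 1 < n) :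
    altLoop 0 n s e o p = (-1, -1, -1, -1, -1) := by rw [altLoop.eq_def]; simp [h]

lemma altLoop_odd (f : Nat) (n s e o p : Int) (h : 1 < n) (h2 : PySem.Int.mod n 2 ≠ 0) :
    altLoop (f + 1) n s e o p =
      altLoop f (3 * n + 1) (s + 1) e (o + 1) (if p < 3 * n + 1 then 3 * n + 1 else p) := by
  have hdvd : ¬ ((2:Int) ∣ n) := fun hd => h2 ((PySem.Int.mod_eq_zero_iff_dvd n 2).2 hd)
  rw [altLoop.eq_def]; simp [h, hdvd]

lemma altLoop_even (f : Nat) (n s e o p : Int) (h : 1 < n) (h2 : PySem.Int.mod n 2 = 0) :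
    altLoop (f + 1) n s e o p =
      altLoop f (PySem.Int.floordiv n 2) (s + 1) (e + 1) o
        (if p < PySem.Int.floordiv n 2 then PySem.Int.floordiv n 2 else p) := by
  have hdvd : (2:Int) ∣ n := (PySem.Int.mod_eq_zero_iff_dvd n 2).1 h2
  rw [altLoop.eq_def]; simp [h, hdvd]

lemma pow_succ_mul_pos_facts (k : Nat) (m : Int) (hm : 1 ≤ m) :
    1 < (2:Int) ^ (k+1) * m ∧ (2:Int) ^ k * m ≤ 2 ^ (k+1) * m := by
  have h1 : (1:Int) ≤ 2 ^ k := one_le_pow₀ (by norm_num)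
  have ha : (2:Int) ^ (k+1) ≤ 2 ^ (k+1) * m := le_mul_of_one_le_right (by positivity) hm
  have hb : (2:Int) ^ (k+1) = 2 * 2 ^ k := by ring
  have hc : (2:Int) ^ k * m ≤ 2 ^ (k+1) * m := by nlinarith
  exact ⟨by nlinarith, hc⟩

lemma chunk_run'  (k : Nat) : ∀ (f : Nat) (m s e o p : Int), 1 ≤ m → (2 ^ k * m : Int) ≤ p → k ≤ f →
    altLoop f (2 ^ k * m) s e o p = altLoop (f - k) m (s + (k : Int)) (e + (k : Int)) o p := by
  induction k with
  | zero => intro f m s e o p _ _ _; simp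
  | succ k ih =>
    intro f m s e o p hm hp hkf
    match f, hkf with
    | f + 1, hkf =>
      obtain ⟨hn, hle⟩ := pow_succ_mul_pos_facts k m hm
      have hmod : PySem.Int.mod ((2:Int) ^ (k+1) * m) 2 = 0 := by
        rw [PySem.Int.mod_eq_zero_iff_dvd]
        exact ⟨2 ^ k * m, by ring⟩
      have hdiv : PySem.Int.floordiv ((2:Int) ^ (k+1) * m) 2 = 2 ^ k * m := by
        rw [PySem.Int.floordiv_eq_ediv_of_pos (by norm_num)]
        rw [show (2:Int) ^ (k+1) * m = 2 ^ k * m * 2 by ring]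
        exact Int.mul_ediv_cancel _ (by norm_num)
      rw [altLoop_even f _ s e o p hn hmod, hdiv]
      rw [if_neg (by omega)]
      rw [ih f m (s + 1) (e + 1) o p hm (le_trans hle hp) (by omega)]
      have hfk : f + 1 - (k + 1) = f - k := by omega
      rw [hfk]; push_cast; ring_nf

lemma nat_decomp : ∀ N : Nat, N ≠ 0 → ∃ k m, m % 2 = 1 ∧ N = 2 ^ k * m := by
  intro N
  induction N using Nat.strong_induction_on with
  | _ N ih =>
    intro hN
    by_cases h : N % 2 = 1
    · exact ⟨0, N, h, by ring⟩
    · have h2 : N % 2 = 0 := by omega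
      obtain ⟨k, m, hm, he⟩ := ih (N / 2) (by omega) (by omega)
      refine ⟨k + 1, m, hm, ?_⟩
      have hN2 : N = 2 * (N / 2) := by omega
      rw [hN2, he]; ring

lemma decomp (n : Int) (h1 : 1 < n) (h2 : PySem.Int.mod n 2 = 0) :
    ∃ (k m : Nat), 1 ≤ k ∧ m % 2 = 1 ∧ n = 2 ^ k * (m : Int) := by
  have hdvd : (2 : Int) ∣ n := (PySem.Int.mod_eq_zero_iff_dvd n 2).1 h2
  have hN : n.toNat ≠ 0 := by omega
  obtain ⟨k, m, hm, he⟩ := nat_decomp n.toNat hN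
  have hn : n = ((2 ^ k * m : Nat) : Int) := by omega
  refine ⟨k, m, ?_, hm, by push_cast at hn ⊢; omega⟩
  rcases k with _ | k
  · exfalso
    have : n.toNat % 2 = 0 := by omega
    simp at he; omega
  · omega

lemma chunk_out : ∀ (f k : Nat) (m s e o p : Int), 1 ≤ m → f < k →
    altLoop f (2 ^ k * m) s e o p = (-1, -1, -1, -1, -1) := by
  intro f
  induction f with
  | zero =>
    intro k m s e o p hm hfk
    match k, hfk with
    | k + 1, _ => exact altLoop_zero _ _ _ _ _ (pow_succ_mul_pos_facts k m hm).1
  | succ f ih =>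
    intro k m s e o p hm hfk
    match k, hfk with
    | k + 1, hfk =>
      obtain ⟨hn, _⟩ := pow_succ_mul_pos_facts k m hm
      have hmod : PySem.Int.mod ((2:Int) ^ (k+1) * m) 2 = 0 := by
        rw [PySem.Int.mod_eq_zero_iff_dvd]
        exact ⟨2 ^ k * m, by ring⟩
      have hdiv : PySem.Int.floordiv ((2:Int) ^ (k+1) * m) 2 = 2 ^ k * m := by
        rw [PySem.Int.floordiv_eq_ediv_of_pos (by norm_num)]
        rw [show (2:Int) ^ (k+1) * m = 2 ^ k * m * 2 by ring]
        exact Int.mul_ediv_cancel _ (by norm_num)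
      rw [altLoop_even f _ s e o p hn hmod, hdiv]
      exact ih k m (s + 1) (e + 1) o _ hm (by omega)

-- srcLoop one-step unfolding lemmas
lemma srcLoop_base (fuel : Nat) (n s e o p : Int) (h : ¬ 1 < n) :
    srcLoop fuel n s e o p = (s, e, o, n, p) := by rw [srcLoop.eq_def]; simp [h]

lemma srcLoop_zero (n s e o p : Int) (h : 1 < n) :
    srcLoop 0 n s e o p = (-1, -1, -1, -1, -1) := by rw [srcLoop.eq_def]; simp [h]

lemma srcLoop_odd (f : Nat) (n s e o p : Int) (h : 1 < n) (h2 : PySem.Int.mod n 2 ≠ 0) :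
    srcLoop (f + 1) n s e o p =
      srcLoop f (n + 2 * n + 1) (s + 1) e (o + 1) (if p < n + 2 * n + 1 then n + 2 * n + 1 else p) := by
  have hdvd : ¬ ((2:Int) ∣ n) := fun hd => h2 ((PySem.Int.mod_eq_zero_iff_dvd n 2).2 hd)
  rw [srcLoop.eq_def]; simp [h, hdvd]

lemma srcLoop_even (f : Nat) (n s e o p : Int) (h : 1 < n) (h2 : PySem.Int.mod n 2 = 0)
    (hg : tzNat n.toNat ≤ f + 1 ∧ 1 ≤ tzNat n.toNat) :
    srcLoop (f + 1) n s e o p =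
      srcLoop (f + 1 - tzNat n.toNat) (PySem.Int.floordiv n (2 ^ tzNat n.toNat))
        (s + (tzNat n.toNat : Int)) (e + (tzNat n.toNat : Int)) o
        (if p < PySem.Int.floordiv n (2 ^ tzNat n.toNat) then PySem.Int.floordiv n (2 ^ tzNat n.toNat) else p) := by
  have hdvd : (2:Int) ∣ n := (PySem.Int.mod_eq_zero_iff_dvd n 2).1 h2
  rw [srcLoop.eq_def]; simp [h, hdvd, hg]

lemma srcLoop_even_out (f : Nat) (n s e o p : Int) (h : 1 < n) (h2 : PySem.Int.mod n 2 = 0)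
    (hg : ¬ (tzNat n.toNat ≤ f + 1 ∧ 1 ≤ tzNat n.toNat)) :
    srcLoop (f + 1) n s e o p = (-1, -1, -1, -1, -1) := by
  have hdvd : (2:Int) ∣ n := (PySem.Int.mod_eq_zero_iff_dvd n 2).1 h2
  rw [srcLoop.eq_def]; simp [h, hdvd, hg]

lemma loops_eq : ∀ (fuel : Nat) (n s e o p : Int), 1 ≤ n → n ≤ p →
    srcLoop fuel n s e o p = altLoop fuel n s e o p := by
  intro fuel
  induction fuel using Nat.strong_induction_on with
  | _ fuel ih =>
    intro n s e o p hn hp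
    by_cases h1 : 1 < n
    case neg => rw [srcLoop_base _ _ _ _ _ _ h1, altLoop_base _ _ _ _ _ _ h1]
    match fuel with
    | 0 => rw [srcLoop_zero _ _ _ _ _ h1, altLoop_zero _ _ _ _ _ h1]
    | f + 1 =>
      by_cases h2 : PySem.Int.mod n 2 = 0
      · -- even: A strips all k trailing zeros at once; B takes k halving steps
        obtain ⟨k, m, hk, hm, he⟩ := decomp n h1 h2
        have hm1 : (1:Int) ≤ (m:Int) := by
          have : m ≠ 0 := by omega
          exact_mod_cast Nat.one_le_iff_ne_zero.2 this
        have hMn : n.toNat = 2 ^ k * m := by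
          have : n = ((2 ^ k * m : Nat) : Int) := by push_cast; exact he
          omega
        have htz : tzNat n.toNat = k := by rw [hMn]; exact tzNat_pow k m hm
        have hdiv : PySem.Int.floordiv n (2 ^ tzNat n.toNat) = (m:Int) := by
          rw [htz, he, PySem.Int.floordiv_eq_ediv_of_pos (by positivity)]
          exact Int.mul_ediv_cancel_left _ (by positivity)
        have hmle : (m:Int) ≤ n := by
          rw [he]
          exact le_mul_of_one_le_left (by omega) (one_le_pow₀ (by norm_num))
        by_cases hg : tzNat n.toNat ≤ f + 1 ∧ 1 ≤ tzNat n.toNat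
        · rw [srcLoop_even f n s e o p h1 h2 hg, hdiv, if_neg (by omega), htz]
          rw [he, chunk_run' k (f + 1) m s e o p hm1 (he ▸ hp) (by omega)]
          exact ih (f + 1 - k) (by omega) m _ _ o p hm1 (by omega)
        · rw [srcLoop_even_out f n s e o p h1 h2 hg]
          rw [he, chunk_out (f + 1) k m s e o p hm1 (by omega)]
      · -- odd: both make the same 3n+1 step
        rw [srcLoop_odd f n s e o p h1 h2, altLoop_odd f n s e o p h1 h2]
        rw [show n + 2 * n + 1 = 3 * n + 1 by ring]
        exact ih f (by omega) (3 * n + 1) _ _ _ _ (by omega) (by split <;> omega)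

-- ===== VERDICT (by name: the statement is the Claim_ definition above) =====
theorem collatz_superfast_pure_py_spec : Claim_equal_collatz_superfast_pure_py := by
  intro n _ hpre
  unfold Spec_collatz_superfast_pure_py collatz_superfast_pure_py collatz_superfast_pure_py_alt
  exact loops_eq 100000 n 0 0 0 n hpre le_rfl
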